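-- pv_equiv track=rewrite | github.com/navsabres/fantasy_football_assistant | data_manager.py | _combine_stats
-- ===== SOURCE A (Python) =====
-- def _combine_stats(stats):
--     """Combine stats from different sources with priority order"""
--     combined = {}
--
--     # Priority: NFL > ESPN > Sleeper
--     sources = ['nfl', 'espn', 'sleeper']
--
--     for stat_type in ['passing_yards', 'passing_touchdowns', 'rushing_yards',
--                      'rushing_touchdowns', 'receptions', 'receiving_yards',
--                      'receiving_touchdowns', 'interceptions', 'fumbles']:
--         for source in sources:
--             if source in stats and stat_type in stats[source]:
--                 combined[stat_type] = stats[source][stat_type]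
--                 break
--
--     return combined
-- ===== SOURCE B (Python) =====
-- STAT_TYPES = ['passing_yards', 'passing_touchdowns', 'rushing_yards',
--               'rushing_touchdowns', 'receptions', 'receiving_yards',
--               'receiving_touchdowns', 'interceptions', 'fumbles']
--
--
-- def _combine_stats(stats):
--     """Combine stats from different sources with priority order.
--
--     Inverted decomposition: sweep sources from lowest to highest priority,
--     letting higher-priority sources overwrite (last-writer-wins), then emit
--     the merged values in the fixed stat-type order.
--     """
--     merged = {}
--     for source in ('sleeper', 'espn', 'nfl'):
--         if source in stats:
--             d = stats[source]
--             for stat_type in STAT_TYPES: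
--                 if stat_type in d:
--                     merged[stat_type] = d[stat_type]
--     return {st: merged[st] for st in STAT_TYPES if st in merged}
-- ===== Notes on version B (the rewrite author's own statement) =====
-- stated objective: alternative
-- what changed: Replaces the per-stat first-match search over sources (inner loop with break) by a reverse-priority sweep: each present source overwrites the merged dict (last-writer-wins), and a final comprehension emits the result in the fixed stat-type order.
import Mathlib
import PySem

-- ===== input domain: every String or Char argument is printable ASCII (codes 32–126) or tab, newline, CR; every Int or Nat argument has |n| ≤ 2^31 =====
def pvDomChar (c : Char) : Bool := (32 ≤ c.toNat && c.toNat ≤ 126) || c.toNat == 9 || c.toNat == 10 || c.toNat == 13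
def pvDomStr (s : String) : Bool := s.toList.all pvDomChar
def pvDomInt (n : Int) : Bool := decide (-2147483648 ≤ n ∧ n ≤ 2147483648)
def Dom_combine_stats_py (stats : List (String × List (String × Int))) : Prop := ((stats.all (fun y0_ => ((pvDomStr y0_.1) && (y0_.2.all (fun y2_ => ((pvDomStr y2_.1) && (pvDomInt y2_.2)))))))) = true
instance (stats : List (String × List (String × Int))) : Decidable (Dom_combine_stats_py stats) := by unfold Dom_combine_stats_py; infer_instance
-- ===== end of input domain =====

-- B replaces A's per-stat first-match search (inner loop with break) by a reverse-priority
-- overwrite sweep over the sources followed by an ordered emit (objective: alternative).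

-- ===== PORT A =====
-- the fixed stat-type list of A's outer loop
def pvStatTypes : List String :=
  ["passing_yards", "passing_touchdowns", "rushing_yards",
   "rushing_touchdowns", "receptions", "receiving_yards",
   "receiving_touchdowns", "interceptions", "fumbles"]

-- A's inner "for source in sources: … break" loop: value from the first source present in
-- stats whose dict contains statType (none = no break taken)
def pvInnerA (sd : PySem.Dict String (List (String × Int))) (statType : String) :
    List String → Option Int
  | [] => none
  | src :: rest =>
    if sd.contains src then
      match (PySem.Dict.mk (sd.getD src [])).get? statType with
      | some v => some v
      | none => pvInnerA sd statType rest
    else pvInnerA sd statType rest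

def combine_stats_py (stats : List (String × List (String × Int))) : List (String × Int) :=
  let sd := PySem.Dict.mk stats
  let combined :=
    pvStatTypes.foldl (fun (combined : PySem.Dict String Int) statType =>
      match pvInnerA sd statType ["nfl", "espn", "sleeper"] with
      | some v => combined.insert statType v
      | none => combined) PySem.Dict.empty
  combined.items

-- ===== PORT B =====
-- B's inner loop: copy every stat type present in source dict d into merged (overwrite)
def pvSweepB (d : PySem.Dict String Int) (merged : PySem.Dict String Int) : PySem.Dict String Int :=
  pvStatTypes.foldl (fun merged statType =>
    match d.get? statType with
    | some v => merged.insert statType v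
    | none => merged) merged

def combine_stats_py_alt (stats : List (String × List (String × Int))) : List (String × Int) :=
  let sd := PySem.Dict.mk stats
  let merged :=
    ["sleeper", "espn", "nfl"].foldl (fun (merged : PySem.Dict String Int) source =>
      if sd.contains source then pvSweepB (PySem.Dict.mk (sd.getD source [])) merged
      else merged) PySem.Dict.empty
  -- final comprehension {st: merged[st] for st in STAT_TYPES if st in merged}
  (pvStatTypes.foldl (fun (out : PySem.Dict String Int) st =>
      if merged.contains st then out.insert st (merged.getD st 0) else out)
    PySem.Dict.empty).items

-- ===== PRECONDITION & SPEC =====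
def Spec_combine_stats_py (stats : List (String × List (String × Int))) (out : List (String × Int)) : Prop := out = combine_stats_py_alt stats
instance (stats : List (String × List (String × Int))) (out : List (String × Int)) : Decidable (Spec_combine_stats_py stats out) := by unfold Spec_combine_stats_py; infer_instance

-- ===== CLAIM (what is proved, stated in full; the proofs are below) =====
def Claim_equal_combine_stats_py : Prop := ∀ (stats : List (String × List (String × Int))), Dom_combine_stats_py stats → Spec_combine_stats_py stats (combine_stats_py stats)

-- ===== LEMMAS AND PROOFS =====

-- lookup through one overwrite sweep over a key list L: a hit in d wins when st ∈ L, else fall through to m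
theorem pv_get_sweepFold (d : PySem.Dict String Int) (L : List String) (m : PySem.Dict String Int)
    (st : String) :
    (L.foldl (fun m t => match d.get? t with | some v => m.insert t v | none => m) m).get? st =
      if st ∈ L then (match d.get? st with | some v => some v | none => m.get? st)
      else m.get? st := by
  induction L generalizing m with
  | nil => simp
  | cons x L ih =>
    simp only [List.foldl_cons]
    by_cases hx : st = x
    · subst hx
      cases hd : d.get? st with
      | none => simp [hd, ih]
      | some v =>
        rw [ih]
        by_cases hL : st ∈ L <;> simp [hL, hd, PySem.Dict.get?_insert_self]
    · have hmem : (st ∈ x :: L) ↔ st ∈ L := by simp [hx]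
      cases hd : d.get? x with
      | none => rw [ih]; simp [hmem]
      | some v => rw [ih]; simp [hmem, PySem.Dict.get?_insert_of_ne _ _ hx]

theorem pv_get_sweepB (d : PySem.Dict String Int) (m : PySem.Dict String Int) (st : String)
    (hst : st ∈ pvStatTypes) :
    (pvSweepB d m).get? st =
      match d.get? st with | some v => some v | none => m.get? st := by
  unfold pvSweepB
  rw [pv_get_sweepFold]
  simp [hst]

-- B's merged dict agrees pointwise with A's inner first-match search, on every stat type
theorem pv_merged_eq_innerA (sd : PySem.Dict String (List (String × Int))) (st : String)
    (hst : st ∈ pvStatTypes) :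
    ((["sleeper", "espn", "nfl"].foldl (fun (merged : PySem.Dict String Int) source =>
        if sd.contains source then pvSweepB (PySem.Dict.mk (sd.getD source [])) merged
        else merged) PySem.Dict.empty).get? st) =
      pvInnerA sd st ["nfl", "espn", "sleeper"] := by
  simp only [List.foldl_cons, List.foldl_nil]
  by_cases h1 : sd.contains "sleeper" <;> by_cases h2 : sd.contains "espn" <;>
    by_cases h3 : sd.contains "nfl" <;>
    simp only [h1, h2, h3, if_true, if_false, pvInnerA, Bool.false_eq_true] <;>
    (repeat rw [pv_get_sweepB _ _ _ hst]) <;>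
    cases hn : (PySem.Dict.mk (sd.getD "nfl" [])).get? st <;>
    cases he : (PySem.Dict.mk (sd.getD "espn" [])).get? st <;>
    cases hs : (PySem.Dict.mk (sd.getD "sleeper" [])).get? st <;>
    simp [hn, he, hs, PySem.Dict.get?_empty]

-- ===== VERDICT (by name: the statement is the Claim_ definition above) =====
theorem combine_stats_py_spec : Claim_equal_combine_stats_py := by
  intro stats _
  unfold Spec_combine_stats_py combine_stats_py combine_stats_py_alt
  refine congrArg PySem.Dict.items ?_
  apply PySem.List.foldl_congr_mem
  intro combined st hst
  rw [PySem.Dict.contains_eq_isSome_get?, PySem.Dict.getD_eq_get?_getD,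
      pv_merged_eq_innerA _ st hst]
  cases pvInnerA (PySem.Dict.mk stats) st ["nfl", "espn", "sleeper"] <;> simp
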